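-- pv_equiv track=rewrite | github.com/zhanghecn/deer-flow | backend/agents/src/agents/middlewares/authoring_guard_middleware.py | is_protected_create_agent_path
-- ===== SOURCE A (Python) =====
-- _PROTECTED_AUTHORING_ROOTS = (
--     "/mnt/user-data/agents",
--     "/mnt/user-data/authoring/agents",
--     "/mnt/user-data/authoring/skills",
-- )
--
-- def _normalize_text(value: object) -> str:
--     return str(value or "").strip()
--
-- def is_protected_create_agent_path(file_path: object) -> bool:
--     normalized = _normalize_text(file_path).lower()
--     if not normalized:
--         return False
--
--     for root in _PROTECTED_AUTHORING_ROOTS: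
--         protected_root = root.lower()
--         if normalized == protected_root or normalized.startswith(f"{protected_root}/"):
--             return True
--     return False
-- ===== SOURCE B (Python) =====
-- _PROTECTED_CREATE_AGENT_ROOTS = frozenset((
--     "/mnt/user-data/agents",
--     "/mnt/user-data/authoring/agents",
--     "/mnt/user-data/authoring/skills",
-- ))
--
--
-- def is_protected_create_agent_path(file_path: object) -> bool:
--     """Walk up the path's ancestor chain, checking each ancestor against the protected roots."""
--     path = str(file_path or "").strip().lower()
--     while path:
--         if path in _PROTECTED_CREATE_AGENT_ROOTS:
--             return True
--         cut = path.rfind("/")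
--         path = path[:cut] if cut >= 0 else ""
--     return False
-- ===== Notes on version B (the rewrite author's own statement) =====
-- stated objective: alternative
-- what changed: B replaces A's loop over the three roots with equality/startswith tests by walking up the path's ancestor chain (repeatedly truncating at the last '/') and checking each ancestor for membership in a frozenset of the protected roots.
import Mathlib
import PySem

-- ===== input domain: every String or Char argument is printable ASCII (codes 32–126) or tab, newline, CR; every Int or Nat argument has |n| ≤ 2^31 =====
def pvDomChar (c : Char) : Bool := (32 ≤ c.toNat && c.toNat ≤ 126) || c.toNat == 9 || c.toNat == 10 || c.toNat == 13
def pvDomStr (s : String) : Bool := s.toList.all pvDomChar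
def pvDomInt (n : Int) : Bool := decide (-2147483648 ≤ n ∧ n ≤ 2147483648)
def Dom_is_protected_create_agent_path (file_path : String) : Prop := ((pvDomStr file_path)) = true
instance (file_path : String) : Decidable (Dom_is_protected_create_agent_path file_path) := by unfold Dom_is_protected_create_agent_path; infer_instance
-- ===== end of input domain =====

-- B replaces A's scan over the three roots with startswith tests by walking up the
-- path's ancestor chain (truncating at the last '/') and checking each ancestor for
-- membership in a set of the protected roots (objective: alternative).

-- ===== PORT A =====
def pvProtectedAuthoringRoots : List String :=
  ["/mnt/user-data/agents", "/mnt/user-data/authoring/agents", "/mnt/user-data/authoring/skills"]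

-- A's for-loop over the roots, with early return
def pvRootsLoop (normalized : List Char) : List String → Bool
  | [] => false
  | root :: rest =>
    let protectedRoot := PySem.Chars.lower root.toList
    if normalized == protectedRoot
        || PySem.Chars.startswith normalized (protectedRoot ++ ['/']) then true
    else pvRootsLoop normalized rest

def is_protected_create_agent_path (file_path : String) : Bool :=
  -- _normalize_text(file_path).lower(): for a str, `str(file_path or "")` is file_path itself
  let normalized := PySem.Chars.lower (PySem.Chars.strip file_path.toList)
  if normalized == [] then false
  else pvRootsLoop normalized pvProtectedAuthoringRoots

-- ===== PORT B =====
def pvProtectedCreateAgentRoots : PySem.Set (List Char) :=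
  PySem.Set.ofList
    ["/mnt/user-data/agents".toList, "/mnt/user-data/authoring/agents".toList,
     "/mnt/user-data/authoring/skills".toList]

-- termination helper for B's while-loop: rfind on a nonempty needle stays below the length
lemma pvRfindGo_lt (s : List Char) : ∀ n : ℕ, n ≤ s.length →
    PySem.Chars.rfind.go s ['/'] n < (s.length : ℤ) ∨ PySem.Chars.rfind.go s ['/'] n = -1 := by
  intro n
  induction n with
  | zero =>
    intro h
    rw [PySem.Chars.rfind.go]
    split
    · rename_i hp
      left
      have : s ≠ [] := by
        intro he; rw [he] at hp; simp [List.isPrefixOf] at hp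
      have : 0 < s.length := List.length_pos_iff.mpr this
      exact_mod_cast this
    · right; rfl
  | succ j ih =>
    intro h
    rw [PySem.Chars.rfind.go]
    split
    · rename_i hp
      left
      have hd : s.drop (j + 1) ≠ [] := by
        intro he; rw [he] at hp; simp [List.isPrefixOf] at hp
      have : j + 1 < s.length := by
        by_contra hc
        exact hd (List.drop_eq_nil_of_le (by omega))
      exact_mod_cast this
    · exact ih (by omega)

-- B's while-loop: check the current path, then truncate at the last '/'
def pvAncestorLoop (path : List Char) : Bool :=
  if hne : path = [] then false
  else if PySem.Set.contains pvProtectedCreateAgentRoots path then true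
  else
    -- cut = path.rfind("/"); path = path[:cut] if cut >= 0 else ""
    if hc : 0 ≤ PySem.Chars.rfind path ['/'] then
      pvAncestorLoop (PySem.Chars.slice path none (some (PySem.Chars.rfind path ['/'])))
    else pvAncestorLoop []
termination_by path.length
decreasing_by
  · have hlt : PySem.Chars.rfind path ['/'] < (path.length : ℤ) := by
      rcases pvRfindGo_lt path path.length le_rfl with h | h
      · exact h
      · rw [PySem.Chars.rfind] at hc
        rw [h] at hc
        norm_num at hc
    have heq : PySem.Chars.rfind path ['/'] = ((PySem.Chars.rfind path ['/']).toNat : ℤ) :=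
      (Int.toNat_of_nonneg hc).symm
    rw [heq, PySem.Chars.slice, PySem.List.slice_to_natCast]
    simp only [List.length_take]
    omega
  · have : 0 < path.length := List.length_pos_iff.mpr hne
    simpa using this

def is_protected_create_agent_path_alt (file_path : String) : Bool :=
  pvAncestorLoop (PySem.Chars.lower (PySem.Chars.strip file_path.toList))

-- ===== PRECONDITION & SPEC =====
def Spec_is_protected_create_agent_path (file_path : String) (out : Bool) : Prop := out = is_protected_create_agent_path_alt file_path
instance (file_path : String) (out : Bool) : Decidable (Spec_is_protected_create_agent_path file_path out) := by unfold Spec_is_protected_create_agent_path; infer_instance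

-- ===== CLAIM (what is proved, stated in full; the proofs are below) =====
def Claim_equal_is_protected_create_agent_path : Prop := ∀ (file_path : String), Dom_is_protected_create_agent_path file_path → Spec_is_protected_create_agent_path file_path (is_protected_create_agent_path file_path)

-- ===== LEMMAS AND PROOFS =====

-- membership in the root set is a three-way disjunction
lemma pvMem_iff (x : List Char) :
    PySem.Set.contains pvProtectedCreateAgentRoots x = true ↔
      (x = "/mnt/user-data/agents".toList ∨ x = "/mnt/user-data/authoring/agents".toList ∨
       x = "/mnt/user-data/authoring/skills".toList) := by
  have h : pvProtectedCreateAgentRoots =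
      ["/mnt/user-data/agents".toList, "/mnt/user-data/authoring/agents".toList,
       "/mnt/user-data/authoring/skills".toList] := by decide
  rw [h]
  simp [PySem.Set.contains]

-- singleton-prefix test = character at that index
lemma pvPrefix_slash (l : List Char) (j : ℕ) :
    (List.isPrefixOf ['/'] (l.drop j)) = true ↔ l[j]? = some '/' := by
  rw [← List.head?_drop, List.isPrefixOf_iff_prefix]
  cases l.drop j with
  | nil => simp
  | cons c t => simp [List.cons_prefix_cons, eq_comm]

-- rfind.go returns the highest '/'-index ≤ n, or -1
lemma pvRfindGo_cases (s : List Char) : ∀ n : ℕ,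
    (PySem.Chars.rfind.go s ['/'] n = -1 ∧ ∀ j : ℕ, j ≤ n → s[j]? ≠ some '/')
  ∨ (∃ j : ℕ, j ≤ n ∧ PySem.Chars.rfind.go s ['/'] n = (j : ℤ) ∧ s[j]? = some '/' ∧
      ∀ k : ℕ, j < k → k ≤ n → s[k]? ≠ some '/') := by
  intro n
  induction n with
  | zero =>
    rw [PySem.Chars.rfind.go]
    by_cases hp : (List.isPrefixOf ['/'] s) = true
    · right
      refine ⟨0, le_rfl, by simp [hp], ?_, by omega⟩
      have := (pvPrefix_slash s 0).mp (by simpa using hp)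
      simpa using this
    · left
      refine ⟨by simp [hp], ?_⟩
      intro j hj
      interval_cases j
      intro hc
      exact hp (by simpa using (pvPrefix_slash s 0).mpr (by simpa using hc))
  | succ j ih =>
    rw [PySem.Chars.rfind.go]
    by_cases hp : (List.isPrefixOf ['/'] (s.drop (j + 1))) = true
    · right
      exact ⟨j + 1, le_rfl, by simp [hp], (pvPrefix_slash s (j + 1)).mp hp, by omega⟩
    · have hnot : s[j + 1]? ≠ some '/' := fun hc => hp ((pvPrefix_slash s (j + 1)).mpr hc)
      rcases ih with ⟨he, hall⟩ | ⟨i, hi, he, hg, hmax⟩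
      · left
        refine ⟨by simp [hp, he], ?_⟩
        intro k hk
        rcases Nat.lt_succ_iff_lt_or_eq.mp (Nat.lt_succ_of_le hk) with h | h
        · exact hall k (by omega)
        · subst h; exact hnot
      · right
        refine ⟨i, by omega, by simp [hp, he], hg, ?_⟩
        intro k hk1 hk2
        rcases Nat.lt_succ_iff_lt_or_eq.mp (Nat.lt_succ_of_le hk2) with h | h
        · exact hmax k hk1 (by omega)
        · subst h; exact hnot

-- the loop never succeeds on the empty path
lemma pvAnc_nil : pvAncestorLoop [] = false := by
  rw [pvAncestorLoop]
  simp

-- B's ancestor walk hits exactly the '/'-boundary prefixes (and the whole string)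
lemma pvAnc_iff : ∀ (n : ℕ) (cs : List Char), cs.length ≤ n →
    (pvAncestorLoop cs = true ↔
      ∃ u v, cs = u ++ v ∧ (v = [] ∨ ∃ v', v = '/' :: v') ∧
        PySem.Set.contains pvProtectedCreateAgentRoots u = true) := by
  intro n
  induction n with
  | zero =>
    intro cs hcs
    have hnil : cs = [] := List.eq_nil_of_length_eq_zero (by omega)
    subst hnil
    rw [pvAnc_nil]
    simp only [Bool.false_eq_true, false_iff]
    rintro ⟨u, v, huv, _, hm⟩
    obtain ⟨rfl, rfl⟩ := List.append_eq_nil_iff.mp huv.symm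
    exact absurd hm (by decide)
  | succ N ih =>
    intro cs hcs
    by_cases hne : cs = []
    · subst hne
      exact ih [] (by simp)
    rw [pvAncestorLoop, dif_neg hne]
    by_cases hmem : PySem.Set.contains pvProtectedCreateAgentRoots cs = true
    · rw [if_pos hmem]
      simp only [true_iff]
      exact ⟨cs, [], by simp, Or.inl rfl, hmem⟩
    · rw [if_neg hmem]
      rcases pvRfindGo_cases cs cs.length with ⟨he, hall⟩ | ⟨r, hr, he, hg, hmax⟩
      · -- no '/' anywhere: the loop truncates to "" and fails; no boundary prefix exists
        have hcut : ¬ (0 ≤ PySem.Chars.rfind cs ['/']) := by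
          rw [PySem.Chars.rfind, he]; norm_num
        rw [dif_neg hcut, pvAnc_nil]
        simp only [Bool.false_eq_true, false_iff]
        rintro ⟨u, v, huv, hb, hm⟩
        rcases hb with rfl | ⟨v', rfl⟩
        · rw [List.append_nil] at huv; subst huv; exact absurd hm hmem
        · refine hall u.length (by rw [huv]; simp) ?_
          rw [huv]
          simp
      · -- r is the last '/'-index: cs's boundary prefixes = {cs} ∪ boundary prefixes of take r
        have hrlen : r < cs.length := (List.getElem?_eq_some_iff.mp hg).1
        have hchar : cs[r]'hrlen = '/' := (List.getElem?_eq_some_iff.mp hg).2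
        have hcut : 0 ≤ PySem.Chars.rfind cs ['/'] := by
          rw [PySem.Chars.rfind, he]; positivity
        rw [dif_pos hcut]
        have hslice : PySem.Chars.slice cs none (some (PySem.Chars.rfind cs ['/'])) = cs.take r := by
          rw [PySem.Chars.rfind, he]
          exact PySem.List.slice_to_natCast cs r
        rw [hslice, ih (cs.take r) (by simp; omega)]
        constructor
        · rintro ⟨u, v, huv, hb, hm⟩
          -- a boundary prefix of take r is a boundary prefix of cs
          refine ⟨u, v ++ cs.drop r, ?_, ?_, hm⟩
          · rw [← List.append_assoc, ← huv, List.take_append_drop]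
          · rcases hb with rfl | ⟨v', rfl⟩
            · right
              refine ⟨cs.drop (r + 1), ?_⟩
              simp [List.drop_eq_getElem_cons hrlen, hchar]
            · exact Or.inr ⟨v' ++ cs.drop r, by simp⟩
        · rintro ⟨u, v, huv, hb, hm⟩
          rcases hb with rfl | ⟨v', rfl⟩
          · rw [List.append_nil] at huv; subst huv; exact absurd hm hmem
          · -- cs[u.length] = '/', so u.length ≤ r by maximality of r
            have hul : u.length < cs.length := by rw [huv]; simp
            have hslash : cs[u.length]? = some '/' := by rw [huv]; simp
            have hle : u.length ≤ r := by
              by_contra hgt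
              exact hmax u.length (by omega) (by omega) hslash
            rcases Nat.lt_or_ge u.length r with hlt | hge
            · -- u is a slash-boundary prefix of take r
              refine ⟨u, '/' :: (v'.take (r - u.length - 1)), ?_, Or.inr ⟨_, rfl⟩, hm⟩
              rw [huv, List.take_append, List.take_of_length_le (by omega)]
              congr 1
              have hsucc : r - u.length = (r - u.length - 1) + 1 := by omega
              rw [hsucc, List.take_succ_cons]
              simp
            · -- u.length = r: u itself is take r
              have hur : u.length = r := by omega
              refine ⟨u, [], ?_, Or.inl rfl, hm⟩
              rw [huv, List.take_append, List.take_of_length_le (by omega)]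
              simp [hur]

-- a boundary prefix equal to r is exactly "= r or startswith r ++ '/'"
lemma pvBoundary_iff (cs r : List Char) :
    (∃ v, cs = r ++ v ∧ (v = [] ∨ ∃ v', v = '/' :: v')) ↔ (cs = r ∨ (r ++ ['/']) <+: cs) := by
  constructor
  · rintro ⟨v, rfl, (rfl | ⟨v', rfl⟩)⟩
    · exact Or.inl (by simp)
    · exact Or.inr ⟨v', by simp⟩
  · rintro (rfl | ⟨t, ht⟩)
    · exact ⟨[], by simp⟩
    · exact ⟨'/' :: t, by simp [← ht], Or.inr ⟨t, rfl⟩⟩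

-- A's loop over the three roots as a disjunction
lemma pvLoopA_iff (cs : List Char) :
    pvRootsLoop cs pvProtectedAuthoringRoots = true ↔
      ((cs = "/mnt/user-data/agents".toList ∨ ("/mnt/user-data/agents".toList ++ ['/']) <+: cs) ∨
       (cs = "/mnt/user-data/authoring/agents".toList ∨ ("/mnt/user-data/authoring/agents".toList ++ ['/']) <+: cs) ∨
       (cs = "/mnt/user-data/authoring/skills".toList ∨ ("/mnt/user-data/authoring/skills".toList ++ ['/']) <+: cs)) := by
  have h1 : PySem.Chars.lower "/mnt/user-data/agents".toList = "/mnt/user-data/agents".toList := by decide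
  have h2 : PySem.Chars.lower "/mnt/user-data/authoring/agents".toList = "/mnt/user-data/authoring/agents".toList := by decide
  have h3 : PySem.Chars.lower "/mnt/user-data/authoring/skills".toList = "/mnt/user-data/authoring/skills".toList := by decide
  simp only [pvProtectedAuthoringRoots, pvRootsLoop, h1, h2, h3]
  simp [PySem.Chars.startswith_iff, Bool.or_eq_true, beq_iff_eq, or_assoc]

lemma pvMain (cs : List Char) :
    (if cs == [] then false else pvRootsLoop cs pvProtectedAuthoringRoots) = pvAncestorLoop cs := by
  by_cases h : cs = []
  · subst h
    rw [pvAnc_nil]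
    simp
  · rw [if_neg (by simpa using h)]
    apply Bool.eq_iff_iff.mpr
    rw [pvLoopA_iff, pvAnc_iff cs.length cs le_rfl]
    constructor
    · rintro (h1 | h2 | h3)
      · obtain ⟨v, hv, hb⟩ := (pvBoundary_iff cs "/mnt/user-data/agents".toList).mpr h1
        exact ⟨"/mnt/user-data/agents".toList, v, hv, hb, by rw [pvMem_iff]; exact Or.inl rfl⟩
      · obtain ⟨v, hv, hb⟩ := (pvBoundary_iff cs "/mnt/user-data/authoring/agents".toList).mpr h2
        exact ⟨"/mnt/user-data/authoring/agents".toList, v, hv, hb, by rw [pvMem_iff]; exact Or.inr (Or.inl rfl)⟩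
      · obtain ⟨v, hv, hb⟩ := (pvBoundary_iff cs "/mnt/user-data/authoring/skills".toList).mpr h3
        exact ⟨"/mnt/user-data/authoring/skills".toList, v, hv, hb, by rw [pvMem_iff]; exact Or.inr (Or.inr rfl)⟩
    · rintro ⟨u, v, huv, hb, hm⟩
      rw [pvMem_iff] at hm
      rcases hm with rfl | rfl | rfl
      · exact Or.inl ((pvBoundary_iff cs _).mp ⟨v, huv, hb⟩)
      · exact Or.inr (Or.inl ((pvBoundary_iff cs _).mp ⟨v, huv, hb⟩))
      · exact Or.inr (Or.inr ((pvBoundary_iff cs _).mp ⟨v, huv, hb⟩))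

-- ===== VERDICT (by name: the statement is the Claim_ definition above) =====
theorem is_protected_create_agent_path_spec : Claim_equal_is_protected_create_agent_path := by
  intro s _
  unfold Spec_is_protected_create_agent_path is_protected_create_agent_path is_protected_create_agent_path_alt
  exact pvMain (PySem.Chars.lower (PySem.Chars.strip s.toList))
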